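-- pv_equiv track=rewrite | github.com/yisuscc/ejercicios_python_independientes | src/Audiencias.py | calcula_ediciones
-- ===== SOURCE A (Python) =====
-- def calcula_ediciones(audiencias):
--     '''
--     Dada una lista de tuplas con las audiencias, calcula el conjunto de ediciones presentes
--     '''
--     '''
--      1 de la lista de audiencias se coge las temporadas
--      2 las metemos en un tipo que no admita repeticiones en este caso un conjunto (mutable,no admite repetición, NO ORDENADO, llaves)
--      3 los pasamos a una lista  y lo ordenamos con el objeto .sort()
--      '''
--     ediciones = {t for t, s  in audiencias} #de una lista con tuplas formadas por dos elementos e y i  nos quedamos solo con e y i mediante un bucle.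
--     #lo convertimos a  unalista
--     ediciones = list(ediciones)
--     ediciones.sort()
--     return ediciones
-- ===== SOURCE B (Python) =====
-- def calcula_ediciones(audiencias):
--     # Sort the first components, then drop adjacent duplicates in one pass
--     # (sorting + adjacency replaces the hash set for uniqueness).
--     firsts = sorted(t for t, s in audiencias)
--     out = []
--     for x in firsts:
--         if not out or out[-1] != x:
--             out.append(x)
--     return out
-- ===== Notes on version B (the rewrite author's own statement) =====
-- stated objective: alternative
-- what changed: Replaces the hash-set dedup (set comprehension, then list+sort) by sort-first-then-drop-adjacent-duplicates in a single pass, with no set at all.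
import Mathlib
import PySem

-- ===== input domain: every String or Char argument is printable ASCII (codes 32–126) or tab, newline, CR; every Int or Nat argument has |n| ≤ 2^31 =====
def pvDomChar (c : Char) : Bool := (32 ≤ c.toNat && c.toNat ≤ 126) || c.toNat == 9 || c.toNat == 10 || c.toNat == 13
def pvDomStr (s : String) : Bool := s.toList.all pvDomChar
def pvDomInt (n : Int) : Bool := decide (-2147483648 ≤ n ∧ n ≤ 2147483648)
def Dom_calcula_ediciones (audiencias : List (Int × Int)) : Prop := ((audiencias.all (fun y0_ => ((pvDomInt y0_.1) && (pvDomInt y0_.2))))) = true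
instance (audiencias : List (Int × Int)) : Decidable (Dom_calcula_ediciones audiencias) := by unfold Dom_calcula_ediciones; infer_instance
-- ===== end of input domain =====

-- B performs the dedup by sorting first and dropping adjacent duplicates, instead of A's hash set; same result, proved equal.

-- ===== PORT A =====
-- ediciones = {t for t, s in audiencias}; ediciones = list(ediciones); ediciones.sort()
-- (the set's hash-iteration order is consumed only by the keyless sort, so Set.ofList + sorted is exact)
def calcula_ediciones (audiencias : List (Int × Int)) : List Int :=
  let ediciones : PySem.Set Int := PySem.Set.ofList (audiencias.map (fun ts => ts.1))
  PySem.List.sorted ediciones (fun x => x) false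

-- ===== PORT B =====
-- firsts = sorted(t for t, s in audiencias); loop appending x when out is empty or out[-1] != x
-- (out[-1] on the nonempty out is out.getLast?)
def calcula_ediciones_alt (audiencias : List (Int × Int)) : List Int :=
  let firsts := PySem.List.sorted (audiencias.map (fun ts => ts.1)) (fun x => x) false
  firsts.foldl (fun out x => if out = [] ∨ out.getLast? ≠ some x then out ++ [x] else out) []

-- ===== PRECONDITION & SPEC =====
def Spec_calcula_ediciones (audiencias : List (Int × Int)) (out : List Int) : Prop := out = calcula_ediciones_alt audiencias
instance (audiencias : List (Int × Int)) (out : List Int) : Decidable (Spec_calcula_ediciones audiencias out) := by unfold Spec_calcula_ediciones; infer_instance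

-- ===== CLAIM (what is proved, stated in full; the proofs are below) =====
def Claim_equal_calcula_ediciones : Prop := ∀ (audiencias : List (Int × Int)), Dom_calcula_ediciones audiencias → Spec_calcula_ediciones audiencias (calcula_ediciones audiencias)

-- ===== LEMMAS AND PROOFS =====

-- recursive description of B's fold: dedup of adjacent duplicates, carrying the last emitted element
def dAdj (prev : Option Int) : List Int → List Int
  | [] => []
  | x :: rest => if prev = some x then dAdj prev rest else x :: dAdj (some x) rest

theorem foldl_dAdj (ys : List Int) : ∀ (acc : List Int) (a : Int),
    ys.foldl (fun out x => if out = [] ∨ out.getLast? ≠ some x then out ++ [x] else out) (acc ++ [a])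
      = acc ++ [a] ++ dAdj (some a) ys := by
  induction ys with
  | nil => intro acc a; simp [dAdj]
  | cons x rest ih =>
    intro acc a
    by_cases hax : a = x
    · subst hax
      simp only [List.foldl_cons]
      have hcond : ¬ (acc ++ [a] = [] ∨ (acc ++ [a]).getLast? ≠ some a) := by
        simp
      rw [if_neg hcond, ih acc a]
      simp [dAdj]
    · have hcond : (acc ++ [a] = [] ∨ (acc ++ [a]).getLast? ≠ some x) := by
        right; simp; omega
      simp only [List.foldl_cons]
      rw [if_pos hcond]
      have := ih (acc ++ [a]) x
      simp only [List.append_assoc] at this ⊢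
      rw [this]
      simp [dAdj, hax]

theorem foldl_nil_dAdj (ys : List Int) :
    ys.foldl (fun out x => if out = [] ∨ out.getLast? ≠ some x then out ++ [x] else out) []
      = dAdj none ys := by
  cases ys with
  | nil => rfl
  | cons x rest =>
    have h := foldl_dAdj rest [] x
    simp only [List.nil_append] at h
    have hstep : List.foldl (fun out x => if out = [] ∨ out.getLast? ≠ some x then out ++ [x] else out) [] (x :: rest)
        = List.foldl (fun out x => if out = [] ∨ out.getLast? ≠ some x then out ++ [x] else out) [x] rest := rfl
    rw [hstep, h]
    simp [dAdj]

theorem dAdj_some_spec (ys : List Int) (hs : ys.Pairwise (· ≤ ·)) (a : Int) (ha : ∀ y ∈ ys, a ≤ y) :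
    (dAdj (some a) ys).Pairwise (· < ·) ∧ (∀ y ∈ dAdj (some a) ys, a < y) ∧
      (∀ x, x ∈ dAdj (some a) ys ↔ x ∈ ys ∧ x ≠ a) := by
  induction ys generalizing a with
  | nil => simp [dAdj]
  | cons y rest ih =>
    have hy : a ≤ y := ha y (by simp)
    have hrest : ∀ z ∈ rest, y ≤ z := fun z hz => (List.pairwise_cons.mp hs).1 z hz
    have hsrest : rest.Pairwise (· ≤ ·) := (List.pairwise_cons.mp hs).2
    by_cases hay : a = y
    · subst hay
      obtain ⟨h1, h2, h3⟩ := ih hsrest a hrest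
      have hd : dAdj (some a) (a :: rest) = dAdj (some a) rest := by simp [dAdj]
      rw [hd]
      refine ⟨h1, h2, ?_⟩
      · intro x
        rw [h3 x]
        constructor
        · rintro ⟨hx, hne⟩; exact ⟨List.mem_cons_of_mem _ hx, hne⟩
        · rintro ⟨hx, hne⟩
          rcases List.mem_cons.mp hx with h | h
          · exact absurd h hne
          · exact ⟨h, hne⟩
    · have halt : a < y := lt_of_le_of_ne hy hay
      obtain ⟨h1, h2, h3⟩ := ih hsrest y hrest
      have hcond : (some a : Option Int) ≠ some y := by simpa using hay
      have hd : dAdj (some a) (y :: rest) = y :: dAdj (some y) rest := by simp [dAdj, hcond]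
      rw [hd]
      refine ⟨?_, ?_, ?_⟩
      · exact List.pairwise_cons.mpr ⟨h2, h1⟩
      · intro z hz
        rcases List.mem_cons.mp hz with h | h
        · subst h; exact halt
        · exact lt_trans halt (h2 z h)
      · intro x
        rw [List.mem_cons, h3 x, List.mem_cons]
        constructor
        · rintro (rfl | ⟨hx, hne⟩)
          · exact ⟨Or.inl rfl, hay ∘ Eq.symm⟩
          · exact ⟨Or.inr hx, by
              intro h; subst h
              exact absurd (le_antisymm hy (hrest x hx)) hay⟩
        · rintro ⟨hx | hx, hne⟩
          · exact Or.inl hx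
          · by_cases hxy : x = y
            · exact Or.inl hxy
            · exact Or.inr ⟨hx, hxy⟩

theorem dAdj_none_spec (ys : List Int) (hs : ys.Pairwise (· ≤ ·)) :
    (dAdj none ys).Pairwise (· < ·) ∧ (∀ x, x ∈ dAdj none ys ↔ x ∈ ys) := by
  cases ys with
  | nil => simp [dAdj]
  | cons y rest =>
    have hrest : ∀ z ∈ rest, y ≤ z := fun z hz => (List.pairwise_cons.mp hs).1 z hz
    have hsrest : rest.Pairwise (· ≤ ·) := (List.pairwise_cons.mp hs).2
    obtain ⟨h1, h2, h3⟩ := dAdj_some_spec rest hsrest y hrest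
    have hd : dAdj none (y :: rest) = y :: dAdj (some y) rest := by simp [dAdj]
    rw [hd]
    refine ⟨List.pairwise_cons.mpr ⟨h2, h1⟩, ?_⟩
    intro x
    rw [List.mem_cons, h3 x, List.mem_cons]
    constructor
    · rintro (rfl | ⟨hx, _⟩)
      · exact Or.inl rfl
      · exact Or.inr hx
    · rintro (rfl | hx)
      · exact Or.inl rfl
      · by_cases hxy : x = y
        · exact Or.inl hxy
        · exact Or.inr ⟨hx, hxy⟩

-- ===== VERDICT (by name: the statement is the Claim_ definition above) =====
theorem calcula_ediciones_spec : Claim_equal_calcula_ediciones := by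
  intro audiencias _
  unfold Spec_calcula_ediciones calcula_ediciones calcula_ediciones_alt
  set fs := audiencias.map (fun ts => ts.1) with hfs
  set ys := PySem.List.sorted fs (fun x => x) false with hys
  rw [foldl_nil_dAdj]
  have hp : ys.Pairwise (· ≤ ·) := by
    have := PySem.List.sorted_pairwise fs (fun x => x)
    simpa [hys] using this
  obtain ⟨hlt, hmem⟩ := dAdj_none_spec ys hp
  have hperm : (dAdj none ys).Perm (PySem.Set.ofList fs) := by
    apply (List.perm_ext_iff_of_nodup ?_ ?_).mpr
    · intro x
      rw [hmem x, PySem.List.mem_sorted, PySem.Set.mem_ofList]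
    · exact hlt.imp fun h => ne_of_lt h
    · exact PySem.Set.nodup_ofList fs
  exact PySem.List.sorted_eq_of_perm_of_pairwise_lt _ _ (fun x : Int => x) hperm (by simpa using hlt)
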